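-- pv_equiv track=rewrite | github.com/AniMazu/capstonesipsml | Deployments/service_files/score.py | HasMultipleNumPeriod
-- ===== SOURCE A (Python) =====
-- def HasMultipleNumPeriod(s):
--     s = str(s)
--     flag = False
--     for i in range(0,len(s)-1):
--         if s[i].isnumeric() and s[i+1] == '.' and not flag:
--             flag = True
--         if s[i].isnumeric() and s[i+1] == '.' and flag:
--             return True
--     return False
-- ===== SOURCE B (Python) =====
-- def HasMultipleNumPeriod(s):
--     s = str(s)
--     for part in s.split('.')[:-1]:
--         if part and part[-1].isnumeric():
--             return True
--     return False
-- ===== Notes on version B (the rewrite author's own statement) =====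
-- stated objective: simpler
-- what changed: Replaced the index-pair sliding scan with its redundant flag by a pass that splits the string on the period delimiter and checks whether any non-final segment ends in a numeric character.
import Mathlib
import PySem

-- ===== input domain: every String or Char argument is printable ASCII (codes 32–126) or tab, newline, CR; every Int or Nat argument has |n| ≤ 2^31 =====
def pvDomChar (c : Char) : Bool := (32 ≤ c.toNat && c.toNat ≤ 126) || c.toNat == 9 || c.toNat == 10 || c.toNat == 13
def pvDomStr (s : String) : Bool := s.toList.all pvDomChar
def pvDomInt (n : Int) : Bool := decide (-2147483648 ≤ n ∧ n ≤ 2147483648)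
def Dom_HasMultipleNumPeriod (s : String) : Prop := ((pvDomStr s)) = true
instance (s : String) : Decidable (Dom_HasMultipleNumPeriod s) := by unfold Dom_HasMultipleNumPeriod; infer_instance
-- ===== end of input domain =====

-- B replaces A's index-pair sliding scan (with its redundant flag) by a delimiter-split pass over
-- the non-final segments; same cost, simpler.
-- Python's .isnumeric() is ported as PySem.Chars.isdigit, exact on the ASCII domain.

-- ===== PORT A =====
-- the for-loop over i in range(0, len(s)-1), carrying the flag; each step looks at s[i], s[i+1]
def HasMultipleNumPeriodGo : List Char → Bool → Bool
  | c :: d :: rest, flag =>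
    let flag1 := if PySem.Chars.isdigit c && (d == '.') && !flag then true else flag
    if PySem.Chars.isdigit c && (d == '.') && flag1 then true
    else HasMultipleNumPeriodGo (d :: rest) flag1
  | _, _ => false

def HasMultipleNumPeriod (s : String) : Bool :=
  HasMultipleNumPeriodGo s.toList false

-- ===== PORT B =====
-- part and part[-1].isnumeric()
def pvSegOk (p : List Char) : Bool :=
  !p.isEmpty && ((PySem.List.pyGet? p (-1)).map PySem.Chars.isdigit).getD false

-- s.split('.') for the one-character separator is List.splitOn '.'; [:-1] is dropLast;
-- the for-loop with early return is List.any
def HasMultipleNumPeriod_alt (s : String) : Bool :=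
  ((s.toList.splitOn '.').dropLast).any pvSegOk

-- ===== PRECONDITION & SPEC =====
def Spec_HasMultipleNumPeriod (s : String) (out : Bool) : Prop := out = HasMultipleNumPeriod_alt s
instance (s : String) (out : Bool) : Decidable (Spec_HasMultipleNumPeriod s out) := by unfold Spec_HasMultipleNumPeriod; infer_instance

-- ===== CLAIM (what is proved, stated in full; the proofs are below) =====
def Claim_equal_HasMultipleNumPeriod : Prop := ∀ (s : String), Dom_HasMultipleNumPeriod s → Spec_HasMultipleNumPeriod s (HasMultipleNumPeriod s)

-- ===== LEMMAS AND PROOFS =====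

-- the common characterisation: some character is numeric and immediately followed by '.'
def pvPairSpec (cs : List Char) : Bool :=
  (cs.zipWith (fun a b => PySem.Chars.isdigit a && b == '.') cs.tail).any id

theorem pvPairSpec_cons (c : Char) (cs : List Char) :
    pvPairSpec (c :: cs) = ((PySem.Chars.isdigit c && (cs.head? == some '.')) || pvPairSpec cs) := by
  cases cs <;> simp [pvPairSpec]

-- A side: the flag never changes the outcome — the first matching pair returns immediately
theorem go_eq_pairSpec (cs : List Char) : ∀ flag, HasMultipleNumPeriodGo cs flag = pvPairSpec cs := by
  induction cs with
  | nil => intro flag; simp [HasMultipleNumPeriodGo, pvPairSpec]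
  | cons c cs ih =>
    intro flag
    cases cs with
    | nil => simp [HasMultipleNumPeriodGo, pvPairSpec]
    | cons d rest =>
      rw [pvPairSpec_cons, HasMultipleNumPeriodGo]
      by_cases h : (PySem.Chars.isdigit c && (d == '.')) = true
      · simp [h]
      · simp only [Bool.and_eq_true] at h
        simp [ih]
        by_cases h1 : PySem.Chars.isdigit c = true <;> by_cases h2 : (d == '.') = true <;>
          simp_all

theorem pvSegOk_cons_of_ne_nil (c : Char) (p : List Char) (h : p ≠ []) :
    pvSegOk (c :: p) = pvSegOk p := by
  cases p with
  | nil => exact absurd rfl h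
  | cons a q =>
    simp only [pvSegOk, List.isEmpty_cons, PySem.List.pyGet?]
    simp only [PySem.List.pyIdx?]
    norm_num
    rfl

theorem pvSegOk_nil : pvSegOk [] = false := by
  simp [pvSegOk]

theorem pvSegOk_singleton (c : Char) : pvSegOk [c] = PySem.Chars.isdigit c := by
  simp [pvSegOk, PySem.List.pyGet?, PySem.List.pyIdx?]

-- B side: one unfolding step of the split-based pass
theorem alt_step (c : Char) (cs : List Char) :
    (((c :: cs).splitOn '.').dropLast).any pvSegOk =
      ((PySem.Chars.isdigit c && (cs.head? == some '.')) || ((cs.splitOn '.').dropLast).any pvSegOk) := by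
  by_cases hc : c = '.'
  · subst hc
    obtain ⟨h, t, hP⟩ := List.exists_cons_of_ne_nil (List.splitOnP_ne_nil (· == '.') cs)
    have hdig : PySem.Chars.isdigit '.' = false := by decide
    simp [List.splitOn, List.splitOnP_cons, hP, hdig, pvSegOk] at *
  · cases cs with
    | nil => simp [List.splitOn, List.splitOnP_cons, hc]
    | cons d rest =>
      obtain ⟨h, t, hP⟩ := List.exists_cons_of_ne_nil (List.splitOnP_ne_nil (· == '.') rest)
      by_cases hd : d = '.'
      · subst hd
        simp [List.splitOn, List.splitOnP_cons, hc, hP, pvSegOk_singleton, pvSegOk_nil]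
      · cases t with
        | nil => simp [List.splitOn, List.splitOnP_cons, hc, hd, hP]
        | cons t0 t1 =>
          simp [List.splitOn, List.splitOnP_cons, hc, hd, hP,
            pvSegOk_cons_of_ne_nil c (d :: h) (by simp)]

theorem splitAny_eq_pairSpec (cs : List Char) :
    ((cs.splitOn '.').dropLast).any pvSegOk = pvPairSpec cs := by
  induction cs with
  | nil => simp [pvPairSpec]
  | cons c cs ih => rw [alt_step, ih, pvPairSpec_cons]

-- ===== VERDICT (by name: the statement is the Claim_ definition above) =====
theorem HasMultipleNumPeriod_spec : Claim_equal_HasMultipleNumPeriod := by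
  intro s _
  unfold Spec_HasMultipleNumPeriod HasMultipleNumPeriod HasMultipleNumPeriod_alt
  rw [go_eq_pairSpec, splitAny_eq_pairSpec]
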